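-- pv_equiv track=rewrite | github.com/Soualihou237/deepcpp_pred | Home.py | valid_peptideseq
-- ===== SOURCE A (Python) =====
-- def valid_peptideseq(cpp_sequence):
--
--     # Define the set of conventional amino acids
--     valid_amino_acids = {'A', 'C', 'D', 'E', 'F', 'G', 'H', 'I', 'K', 'L',
--                          'M', 'N', 'P', 'Q', 'R', 'S', 'T', 'V', 'W', 'Y'}
--
--     # Check sequence length
--     if not (5 <= len(cpp_sequence) <= 30):
--         return False
--
--     # Check if all characters in the sequence are valid amino acids
--     for residue in cpp_sequence:
--         if residue.upper() not in valid_amino_acids: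
--             return False
--     return True
-- ===== SOURCE B (Python) =====
-- def valid_peptideseq(cpp_sequence):
--     n = len(cpp_sequence)
--     if n < 5 or n > 30:
--         return False
--     # one pass: frequency table of upper-cased residues
--     counts = {}
--     for residue in cpp_sequence:
--         key = residue.upper()
--         counts[key] = counts.get(key, 0) + 1
--     # valid iff the 20 conventional amino acids account for every residue
--     return sum(counts.get(aa, 0) for aa in "ACDEFGHIKLMNPQRSTVWY") == n
-- ===== Notes on version B (the rewrite author's own statement) =====
-- stated objective: alternative
-- what changed: A's per-residue membership loop with early return is replaced by building a frequency counter of upper-cased residues in one pass and checking that the counts of the 20 valid amino acids sum to the sequence length (no per-character membership test).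
import Mathlib
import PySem

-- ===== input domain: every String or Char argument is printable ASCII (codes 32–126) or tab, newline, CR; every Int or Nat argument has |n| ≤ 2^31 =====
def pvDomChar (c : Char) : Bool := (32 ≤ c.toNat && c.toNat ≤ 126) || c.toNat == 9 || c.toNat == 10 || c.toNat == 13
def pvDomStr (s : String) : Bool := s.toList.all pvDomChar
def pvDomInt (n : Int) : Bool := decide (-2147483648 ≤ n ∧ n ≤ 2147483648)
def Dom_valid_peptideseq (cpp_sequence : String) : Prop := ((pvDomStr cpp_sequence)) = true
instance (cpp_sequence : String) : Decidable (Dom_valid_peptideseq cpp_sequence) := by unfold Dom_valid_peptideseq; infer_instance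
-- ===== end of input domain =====

-- B replaces A's per-residue membership loop by a one-pass frequency counter of
-- upper-cased residues plus a count-sum-equals-length check (objective: alternative, same cost).

-- ===== PORT A =====
-- the set literal of conventional amino acids
def pvValidAminoAcids : PySem.Set Char :=
  PySem.Set.ofList ['A', 'C', 'D', 'E', 'F', 'G', 'H', 'I', 'K', 'L',
                    'M', 'N', 'P', 'Q', 'R', 'S', 'T', 'V', 'W', 'Y']

-- A's for-loop with early return, as structural recursion over the residues
def pvScanA : List Char → Bool
  | [] => true
  | residue :: rest =>
      if ¬ PySem.Set.contains pvValidAminoAcids (PySem.Chars.upperChar residue) then false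
      else pvScanA rest

def valid_peptideseq (cpp_sequence : String) : Bool :=
  if ¬ (5 ≤ PySem.Str.len cpp_sequence ∧ PySem.Str.len cpp_sequence ≤ 30) then false
  else pvScanA cpp_sequence.toList

-- ===== PORT B =====
-- B's counting loop: counts[key] = counts.get(key, 0) + 1 with key = residue.upper()
def pvCountsB (l : List Char) : PySem.Dict Char Int :=
  l.foldl (fun d residue =>
      let key := PySem.Chars.upperChar residue
      d.insert key (d.getD key 0 + 1)) PySem.Dict.empty

-- B's sum(counts.get(aa, 0) for aa in "ACDEFGHIKLMNPQRSTVWY")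
def pvSumB (counts : PySem.Dict Char Int) : Int :=
  "ACDEFGHIKLMNPQRSTVWY".toList.foldl (fun acc aa => acc + counts.getD aa 0) 0

def valid_peptideseq_alt (cpp_sequence : String) : Bool :=
  let n := PySem.Str.len cpp_sequence
  if n < 5 ∨ n > 30 then false
  else pvSumB (pvCountsB cpp_sequence.toList) == n

-- ===== PRECONDITION & SPEC =====
def Spec_valid_peptideseq (cpp_sequence : String) (out : Bool) : Prop := out = valid_peptideseq_alt cpp_sequence
instance (cpp_sequence : String) (out : Bool) : Decidable (Spec_valid_peptideseq cpp_sequence out) := by unfold Spec_valid_peptideseq; infer_instance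

-- ===== CLAIM (what is proved, stated in full; the proofs are below) =====
def Claim_equal_valid_peptideseq : Prop := ∀ (cpp_sequence : String), Dom_valid_peptideseq cpp_sequence → Spec_valid_peptideseq cpp_sequence (valid_peptideseq cpp_sequence)

-- ===== LEMMAS AND PROOFS =====
-- the valid-letter list, for the proofs
def pvVList : List Char := "ACDEFGHIKLMNPQRSTVWY".toList

lemma pvScanA_eq_all (l : List Char) :
    pvScanA l = l.all (fun c => decide (PySem.Chars.upperChar c ∈ pvVList)) := by
  induction l with
  | nil => rfl
  | cons c rest ih =>
      simp only [pvScanA, List.all_cons, ih]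
      have hmem : PySem.Set.contains pvValidAminoAcids (PySem.Chars.upperChar c)
          = decide (PySem.Chars.upperChar c ∈ pvVList) := by
        have hset : pvValidAminoAcids = PySem.Set.ofList pvVList := by decide
        by_cases h : PySem.Chars.upperChar c ∈ pvVList
        · simp [h, hset, PySem.Set.mem_ofList]
        · simp only [h, decide_false]
          rw [Bool.eq_false_iff]
          intro hc
          exact h ((PySem.Set.mem_ofList _ _).mp ((PySem.Set.contains_iff _ _).mp (hset ▸ hc)))
      rw [hmem]
      split_ifs with h <;> simp_all

-- counts in B's dict are list counts of the upper-cased residues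
lemma pvCountsB_getD (l : List Char) (v : Char) :
    (pvCountsB l).getD v 0 = ((l.map PySem.Chars.upperChar).count v : Int) := by
  have h : pvCountsB l
      = (l.map PySem.Chars.upperChar).foldl
          (fun d x => d.insert x (d.getD x 0 + 1)) PySem.Dict.empty := by
    unfold pvCountsB
    rw [List.foldl_map]
  rw [h, PySem.Dict.getD_foldl_insert_add_one, PySem.Dict.getD_empty]
  simp

-- splitting a count off a membership count (a not in V')
lemma count_add_countP (a : Char) (V' : List Char) (ha : a ∉ V') (m : List Char) :
    m.count a + m.countP (fun c => decide (c ∈ V'))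
      = m.countP (fun c => decide (c ∈ a :: V')) := by
  induction m with
  | nil => simp
  | cons c m' ih =>
      rw [List.count_cons, List.countP_cons, List.countP_cons, ← ih]
      simp only [List.mem_cons]
      by_cases h1 : c = a
      · simp [h1, ha]
        omega
      · by_cases h2 : c ∈ V'
        · simp [h1, h2]
          omega
        · simp [h1, h2]

-- summing per-letter counts over a duplicate-free list counts membership
lemma foldl_count_eq_countP (V : List Char) (hV : V.Nodup) (m : List Char) (acc : Int) :
    V.foldl (fun acc aa => acc + (m.count aa : Int)) acc
      = acc + (m.countP (fun c => decide (c ∈ V)) : Int) := by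
  induction V generalizing acc with
  | nil => simp
  | cons a V' ih =>
      have hnd := List.nodup_cons.mp hV
      rw [List.foldl_cons, ih hnd.2]
      have := count_add_countP a V' hnd.1 m
      push_cast [← this]
      ring

-- B's sum equals the number of valid residues
lemma pvSumB_eq (l : List Char) :
    pvSumB (pvCountsB l)
      = ((l.map PySem.Chars.upperChar).countP (fun c => decide (c ∈ pvVList)) : Int) := by
  unfold pvSumB
  have hcongr : "ACDEFGHIKLMNPQRSTVWY".toList.foldl (fun acc aa => acc + (pvCountsB l).getD aa 0) 0
      = "ACDEFGHIKLMNPQRSTVWY".toList.foldl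
          (fun acc aa => acc + ((l.map PySem.Chars.upperChar).count aa : Int)) 0 := by
    have hfun : (fun (acc : Int) aa => acc + (pvCountsB l).getD aa 0)
        = (fun (acc : Int) aa => acc + ((l.map PySem.Chars.upperChar).count aa : Int)) := by
      funext acc aa
      rw [pvCountsB_getD]
    rw [hfun]
  rw [hcongr]
  have := foldl_count_eq_countP pvVList (by decide) (l.map PySem.Chars.upperChar) 0
  simpa [pvVList] using this

-- ===== VERDICT (by name: the statement is the Claim_ definition above) =====
theorem valid_peptideseq_spec : Claim_equal_valid_peptideseq := by
  intro s _
  unfold Spec_valid_peptideseq valid_peptideseq valid_peptideseq_alt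
  by_cases h : 5 ≤ PySem.Str.len s ∧ PySem.Str.len s ≤ 30
  · rw [if_neg (by simpa using h), if_neg (by omega)]
    rw [pvScanA_eq_all, pvSumB_eq]
    have hlen : PySem.Str.len s = (s.toList.length : Int) := by
      simp [PySem.Str.len]
    rw [hlen]
    have hcast : (((s.toList.map PySem.Chars.upperChar).countP (fun c => decide (c ∈ pvVList)) : Int)
        == (s.toList.length : Int))
        = decide ((s.toList.map PySem.Chars.upperChar).countP (fun c => decide (c ∈ pvVList))
            = s.toList.length) := by
      rw [Bool.eq_iff_iff]
      simp
    rw [hcast]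
    rw [Bool.eq_iff_iff]
    rw [List.all_eq_true, decide_eq_true_iff]
    rw [show s.toList.length = (s.toList.map PySem.Chars.upperChar).length by simp]
    rw [List.countP_eq_length]
    constructor
    · intro hall a ha
      obtain ⟨c, hc, rfl⟩ := List.mem_map.mp ha
      simpa using hall c hc
    · intro hall c hc
      simpa using hall _ (List.mem_map.mpr ⟨c, hc, rfl⟩)
  · rw [if_pos (by simpa using h), if_pos (by omega)]
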